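-- pv_equiv track=rewrite | github.com/Gabriel-Bastos-Rabelo/marathon-training | maratona primeira fase 2024/H.py | resto
-- ===== SOURCE A (Python) =====
-- def toInteger(s, left, right):
--     val = 0
--     bitVal = 1
--     for i in range(right, left-1, -1):
--         if s[i]=='1':
--             val += bitVal
--         bitVal *= 2
--     return val
--
-- def resto(m, n):
--     n = toInteger(n, 0, len(n)-1)
--     if n == 0:
--         return 1
--
--     # Inicializa `dec` com o valor do primeiro bit de `m`
--     dec = int(m[0]) % n
--
--     # Itera sobre o restante dos bits, começando do segundo bit
--     for i in range(1, len(m)):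
--         dec = (dec * 2 + int(m[i])) % n
--
--     return dec
-- ===== SOURCE B (Python) =====
-- def resto(m, n):
--     # parse n as a binary number (any char other than '1' counts as a 0 bit)
--     d = sum(2**i for i, c in enumerate(reversed(n)) if c == '1')
--     if d == 0:
--         return 1
--     # build the full big-integer value of m, then reduce once
--     return sum(int(c) * 2**i for i, c in enumerate(reversed(m))) % d
-- ===== Notes on version B (the rewrite author's own statement) =====
-- stated objective: faster
-- what changed: Replaces A's descending bit-by-bit toInteger loop and the incremental Horner reduction (a Python-level mod at every step) by one positional big-integer sum with a single final modulo, moving the per-character work into C-level big-int arithmetic.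
import Mathlib
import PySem

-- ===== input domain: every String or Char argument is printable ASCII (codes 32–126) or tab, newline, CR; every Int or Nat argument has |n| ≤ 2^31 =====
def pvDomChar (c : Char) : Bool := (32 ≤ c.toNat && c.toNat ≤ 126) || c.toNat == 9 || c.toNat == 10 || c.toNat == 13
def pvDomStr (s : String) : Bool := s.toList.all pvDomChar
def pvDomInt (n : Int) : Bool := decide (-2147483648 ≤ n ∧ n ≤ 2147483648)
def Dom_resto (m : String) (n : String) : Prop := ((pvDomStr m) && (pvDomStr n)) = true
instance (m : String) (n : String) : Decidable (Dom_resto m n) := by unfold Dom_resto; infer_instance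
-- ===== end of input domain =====

-- B replaces A's bit-by-bit loop + Horner mod-at-every-step by one positional big-integer sum with a single final modulo (measured faster in CPython: the per-character work moves into C-level big-int ops).

-- int(str(c)) for a single character: exact for ASCII digit characters; on any other
-- single character Python raises ValueError, which Pre_resto excludes.
def pvDigit (c : Char) : Int := (c.toNat : Int) - 48

-- ===== PORT A =====
-- toInteger(s, left, right): descending index loop with val/bitVal state.
-- s[i] is ported with pyGetD: at A's sole call site every generated index is in range.
def toInteger (s : String) (left right : Int) : Int :=
  ((PySem.List.pyRange right (left - 1) (-1)).foldl
    (fun (p : Int × Int) i =>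
      (if PySem.List.pyGetD s.toList i ' ' = '1' then p.1 + p.2 else p.1, p.2 * 2))
    (0, 1)).1

def resto (m : String) (n : String) : Int :=
  let nv := toInteger n 0 (PySem.Str.len n - 1)
  if nv = 0 then 1
  else
    let dec0 := PySem.Int.mod (pvDigit (PySem.List.pyGetD m.toList 0 ' ')) nv
    (PySem.List.pyRange 1 (PySem.Str.len m) 1).foldl
      (fun dec i => PySem.Int.mod (dec * 2 + pvDigit (PySem.List.pyGetD m.toList i ' ')) nv)
      dec0

-- ===== PORT B =====
-- sum(2**i for i, c in enumerate(reversed(n)) if c == '1');  enumerate indices are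
-- nonnegative here, so 2**i is ported as 2 ^ i.toNat.
def resto_alt (m : String) (n : String) : Int :=
  let d := (PySem.List.enumerate n.toList.reverse).foldl
    (fun (acc : Int) (p : Int × Char) => if p.2 = '1' then acc + 2 ^ p.1.toNat else acc) 0
  if d = 0 then 1
  else
    PySem.Int.mod
      ((PySem.List.enumerate m.toList.reverse).foldl
        (fun (acc : Int) (p : Int × Char) => acc + pvDigit p.2 * 2 ^ p.1.toNat) 0)
      d

-- ===== PRECONDITION & SPEC =====
-- Pre_ excludes exactly the inputs where Python A raises: when n has a '1' bit (so the
-- modulus is nonzero and m is actually read), m must be nonempty (else IndexError on m[0])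
-- and consist of ASCII digits (else int(...) raises ValueError).
def Pre_resto (m : String) (n : String) : Prop :=
  '1' ∈ n.toList → (m.toList ≠ [] ∧ m.toList.all Char.isDigit = true)
instance (m : String) (n : String) : Decidable (Pre_resto m n) := by unfold Pre_resto; infer_instance
def pvWitness_resto : String × String := ("10", "11")

def Spec_resto (m : String) (n : String) (out : Int) : Prop := out = resto_alt m n
instance (m : String) (n : String) (out : Int) : Decidable (Spec_resto m n out) := by unfold Spec_resto; infer_instance

-- ===== CLAIM (what is proved, stated in full; the proofs are below) =====
def Claim_equal_resto : Prop := ∀ (m : String) (n : String), Dom_resto m n → Pre_resto m n → Spec_resto m n (resto m n)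

-- ===== LEMMAS AND PROOFS =====

-- value of a bit list given LSB-first (reversed) order
def sumBit : List Char → Int
  | [] => 0
  | c :: t => (if c = '1' then 1 else 0) + 2 * sumBit t

def sumDig : List Char → Int
  | [] => 0
  | c :: t => pvDigit c + 2 * sumDig t

theorem sumBit_nonneg (l : List Char) : 0 ≤ sumBit l := by
  induction l with
  | nil => simp [sumBit]
  | cons c t ih => simp only [sumBit]; split <;> omega

theorem sumBit_eq_zero_of_not_mem (l : List Char) (h : '1' ∉ l) : sumBit l = 0 := by
  induction l with
  | nil => rfl
  | cons c t ih =>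
      simp only [List.mem_cons, not_or] at h
      simp [sumBit, Ne.symm h.1, ih h.2]

-- B's enumerate folds compute sumBit / sumDig of the enumerated list
theorem enum_fold_bit (l : List Char) : ∀ (k : Nat) (acc : Int),
    (PySem.List.enumerate l (k : Int)).foldl
      (fun (acc : Int) (p : Int × Char) => if p.2 = '1' then acc + 2 ^ p.1.toNat else acc) acc
    = acc + 2 ^ k * sumBit l := by
  induction l with
  | nil => intro k acc; simp [PySem.List.enumerate, sumBit]
  | cons c t ih =>
      intro k acc
      have hk : ((k : Int) + 1) = ((k + 1 : Nat) : Int) := by push_cast; ring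
      simp only [PySem.List.enumerate, List.foldl_cons, hk, ih, sumBit]
      have : ((k : Int)).toNat = k := Int.toNat_natCast k
      rw [this]
      split <;> ring

theorem enum_fold_dig (l : List Char) : ∀ (k : Nat) (acc : Int),
    (PySem.List.enumerate l (k : Int)).foldl
      (fun (acc : Int) (p : Int × Char) => acc + pvDigit p.2 * 2 ^ p.1.toNat) acc
    = acc + 2 ^ k * sumDig l := by
  induction l with
  | nil => intro k acc; simp [PySem.List.enumerate, sumDig]
  | cons c t ih =>
      intro k acc
      have hk : ((k : Int) + 1) = ((k + 1 : Nat) : Int) := by push_cast; ring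
      simp only [PySem.List.enumerate, List.foldl_cons, hk, ih, sumDig]
      have : ((k : Int)).toNat = k := Int.toNat_natCast k
      rw [this]
      ring

-- A's toInteger over any string computes sumBit of the reversed character list
theorem toInteger_eq (l : List Char) : ∀ (val bv : Int),
    ((PySem.List.pyRange ((l.length : Int) - 1) (-1) (-1)).foldl
      (fun (p : Int × Int) i =>
        (if PySem.List.pyGetD l i ' ' = '1' then p.1 + p.2 else p.1, p.2 * 2))
      (val, bv)).1 = val + bv * sumBit l.reverse := by
  induction l using List.reverseRecOn with
  | nil =>
      intro val bv
      rw [PySem.List.pyRange_neg_one_eq_nil (by simp)]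
      simp [sumBit]
  | append_singleton xs x ih =>
      intro val bv
      have hlen : ((xs ++ [x]).length : Int) - 1 = (xs.length : Int) := by
        simp
      rw [hlen, PySem.List.pyRange_neg_one_cons (by omega)]
      have hget : PySem.List.pyGetD (xs ++ [x]) (xs.length : Int) ' ' = x := by
        rw [PySem.List.pyGetD_natCast]
        simp
      simp only [List.foldl_cons, hget]
      have hcongr :
          (PySem.List.pyRange ((xs.length : Int) - 1) (-1) (-1)).foldl
            (fun (p : Int × Int) i =>
              (if PySem.List.pyGetD (xs ++ [x]) i ' ' = '1' then p.1 + p.2 else p.1, p.2 * 2))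
            ((if x = '1' then val + bv else val), bv * 2)
          = (PySem.List.pyRange ((xs.length : Int) - 1) (-1) (-1)).foldl
            (fun (p : Int × Int) i =>
              (if PySem.List.pyGetD xs i ' ' = '1' then p.1 + p.2 else p.1, p.2 * 2))
            ((if x = '1' then val + bv else val), bv * 2) := by
        apply PySem.List.foldl_congr_mem
        intro acc i hi
        rw [PySem.List.mem_pyRange_neg_one] at hi
        have h0 : 0 ≤ i := by omega
        have h1 : i.toNat < xs.length := by omega
        rw [PySem.List.pyGetD_eq_getElem (xs ++ [x]) ' ' h0 (by simp; omega),
            PySem.List.pyGetD_eq_getElem xs ' ' h0 (by omega)]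
        rw [List.getElem_append_left h1]
      rw [hcongr, ih]
      simp only [List.reverse_append, List.reverse_singleton, List.singleton_append, sumBit]
      split <;> ring

-- Horner with a modulo at every step equals one modulo of plain Horner (positive modulus)
theorem horner_mod (d : Int) (hd : 0 < d) (t : List Char) : ∀ (x : Int),
    t.foldl (fun dec c => PySem.Int.mod (dec * 2 + pvDigit c) d) (PySem.Int.mod x d)
    = PySem.Int.mod (t.foldl (fun v c => v * 2 + pvDigit c) x) d := by
  induction t with
  | nil => intro x; simp
  | cons c t ih =>
      intro x
      simp only [List.foldl_cons]
      have key : PySem.Int.mod (PySem.Int.mod x d * 2 + pvDigit c) d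
          = PySem.Int.mod (x * 2 + pvDigit c) d := by
        rw [PySem.Int.mod_eq_emod_of_pos hd, PySem.Int.mod_eq_emod_of_pos hd,
            PySem.Int.mod_eq_emod_of_pos hd]
        conv_rhs => rw [Int.add_emod, Int.mul_emod]
        conv_lhs => rw [Int.add_emod, Int.mul_emod, Int.emod_emod_of_dvd _ (dvd_refl d)]
      rw [key, ih]

-- plain Horner computes the positional value
theorem horner_eq (t : List Char) : ∀ (x : Int),
    t.foldl (fun v c => v * 2 + pvDigit c) x = x * 2 ^ t.length + sumDig t.reverse := by
  induction t using List.reverseRecOn with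
  | nil => intro x; simp [sumDig]
  | append_singleton xs c ih =>
      intro x
      rw [List.foldl_append, ih]
      simp only [List.foldl_cons, List.foldl_nil, List.reverse_append, List.reverse_singleton,
        List.singleton_append, sumDig, List.length_append, List.length_singleton]
      ring

-- ===== VERDICT (by name: the statement is the Claim_ definition above) =====
theorem resto_spec : Claim_equal_resto := by
  intro m n _ hpre
  unfold Spec_resto
  have hn : toInteger n 0 (PySem.Str.len n - 1) = sumBit n.toList.reverse := by
    unfold toInteger
    rw [PySem.Str.len_eq]
    norm_num
    rw [show n.length = n.toList.length by simp]
    have := toInteger_eq n.toList 0 1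
    rw [this]; ring
  have hd : (PySem.List.enumerate n.toList.reverse 0).foldl
      (fun (acc : Int) (p : Int × Char) => if p.2 = '1' then acc + 2 ^ p.1.toNat else acc) 0
      = sumBit n.toList.reverse := by
    have h := enum_fold_bit n.toList.reverse 0 0
    simpa using h
  by_cases hz : sumBit n.toList.reverse = 0
  · -- modulus zero: both return 1
    unfold resto resto_alt
    rw [hn, hd, hz]
    simp
  · -- positive modulus
    have hpos : 0 < sumBit n.toList.reverse := lt_of_le_of_ne (sumBit_nonneg _) (Ne.symm hz)
    have hmem : '1' ∈ n.toList := by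
      by_contra h
      exact hz (sumBit_eq_zero_of_not_mem _ (by simpa using h))
    obtain ⟨hne, _⟩ := hpre hmem
    obtain ⟨c, t, hct⟩ : ∃ c t, m.toList = c :: t := by
      cases hmt : m.toList with
      | nil => exact absurd hmt hne
      | cons c t => exact ⟨c, t, rfl⟩
    unfold resto resto_alt
    rw [hn, hd, if_neg hz, if_neg hz]
    rw [PySem.Str.len_eq, hct]
    -- A's loop over indices 1..len-1 is the fold over the tail
    have hA := PySem.List.foldl_pyRange_pyGetD' (c :: t) ' '
      (fun dec ch => PySem.Int.mod (dec * 2 + pvDigit ch) (sumBit n.toList.reverse))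
      (PySem.Int.mod (pvDigit (PySem.List.pyGetD (c :: t) 0 ' ')) (sumBit n.toList.reverse))
      (a := 1) (by omega)
    simp only [List.length_cons] at hA ⊢
    rw [hA]
    rw [PySem.List.pyGetD_zero_cons]
    simp only [Int.toNat_one, List.drop_succ_cons, List.drop_zero]
    rw [horner_mod _ hpos]
    have hB := enum_fold_dig (c :: t).reverse 0 0
    simp only [pow_zero, one_mul, zero_add, Int.ofNat_zero] at hB
    rw [hB]
    have hh : t.foldl (fun v ch => v * 2 + pvDigit ch) (pvDigit c)
        = sumDig (c :: t).reverse := by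
      have h0 : (c :: t).foldl (fun v ch => v * 2 + pvDigit ch) 0
          = sumDig (c :: t).reverse := by
        rw [horner_eq]; ring
      simpa using h0
    rw [hh]
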